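-- pv_equiv track=rewrite | github.com/jphouminh71/PythonCodes | Practicum/Practicum1.py | hash_func
-- ===== SOURCE A (Python) =====
-- def hash_func(a_string):
--     counter = 0
--     letter_values = "0123456789"
--     for a_char in (a_string):
--         if a_char == "a":
--             a = 3
--             b = 5
--             c = 7
--             counter = counter + a
--         if a_char == "b":
--             b = 5
--             counter = counter + b
--         if a_char == "c":
--             c = 7
--             counter = counter + c
--
--     return counter
-- ===== SOURCE B (Python) =====
-- from collections import Counter
--
-- def hash_func(a_string):
--     c = Counter(a_string)
--     return 3 * c["a"] + 5 * c["b"] + 7 * c["c"]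
-- ===== Notes on version B (the rewrite author's own statement) =====
-- stated objective: idiomatic
-- what changed: Replaces the per-character if-chain accumulation loop with a Counter frequency table built in one shot (C-level counting) and a fixed closed-form weighted sum 3*c['a']+5*c['b']+7*c['c'].
import Mathlib
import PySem

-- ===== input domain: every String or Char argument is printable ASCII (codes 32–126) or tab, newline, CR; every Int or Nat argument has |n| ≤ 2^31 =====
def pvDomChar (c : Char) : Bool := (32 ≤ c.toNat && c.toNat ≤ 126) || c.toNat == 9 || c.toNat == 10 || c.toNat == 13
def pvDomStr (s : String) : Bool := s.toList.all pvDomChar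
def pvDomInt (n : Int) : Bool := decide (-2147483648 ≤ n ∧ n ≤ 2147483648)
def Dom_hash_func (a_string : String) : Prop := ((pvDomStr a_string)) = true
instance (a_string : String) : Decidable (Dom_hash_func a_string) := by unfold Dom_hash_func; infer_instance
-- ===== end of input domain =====

-- B replaces A's per-character if-chain accumulation with a Counter table and a closed-form weighted sum (idiomatic, same cost).

-- ===== PORT A =====
def hash_func (a_string : String) : Int :=
  a_string.toList.foldl (fun counter a_char =>
    let counter := if a_char == 'a' then counter + 3 else counter
    let counter := if a_char == 'b' then counter + 5 else counter
    if a_char == 'c' then counter + 7 else counter) 0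

-- ===== PORT B =====
def hash_func_alt (a_string : String) : Int :=
  let c := PySem.Dict.counter a_string.toList
  3 * c.getD 'a' 0 + 5 * c.getD 'b' 0 + 7 * c.getD 'c' 0

-- ===== PRECONDITION & SPEC =====
def Spec_hash_func (a_string : String) (out : Int) : Prop := out = hash_func_alt a_string
instance (a_string : String) (out : Int) : Decidable (Spec_hash_func a_string out) := by unfold Spec_hash_func; infer_instance

-- ===== CLAIM (what is proved, stated in full; the proofs are below) =====
def Claim_equal_hash_func : Prop := ∀ (a_string : String), Dom_hash_func a_string → Spec_hash_func a_string (hash_func a_string)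

-- ===== LEMMAS AND PROOFS =====
theorem hash_func_foldl_counts (l : List Char) (init : Int) :
    l.foldl (fun counter a_char =>
      let counter := if a_char == 'a' then counter + 3 else counter
      let counter := if a_char == 'b' then counter + 5 else counter
      if a_char == 'c' then counter + 7 else counter) init
    = init + 3 * (l.count 'a' : Int) + 5 * (l.count 'b' : Int) + 7 * (l.count 'c' : Int) := by
  induction l generalizing init with
  | nil => simp
  | cons x xs ih =>
    simp only [List.foldl_cons, ih, List.count_cons]
    by_cases hx : x = 'a' <;> by_cases hy : x = 'b' <;> by_cases hz : x = 'c' <;>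
      simp [hx, hy, hz] <;> ring

-- ===== VERDICT (by name: the statement is the Claim_ definition above) =====
theorem hash_func_spec : Claim_equal_hash_func := by
  intro s _
  show hash_func s = hash_func_alt s
  rw [hash_func, hash_func_foldl_counts, hash_func_alt]
  simp [PySem.Dict.getD_counter]
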